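-- pv_equiv track=rewrite | github.com/crackyp/local-kb | local_kb/extract.py | _join_fragments
-- ===== SOURCE A (Python) =====
-- def _join_fragments(parts: list[str]) -> str:
--     out = ""
--     for part in parts:
--         if not part:
--             continue
--         if out and not out.endswith((" ", "\n")) and not part.startswith((" ", "\n", ".", ",", ":", ";", "!", "?", ")", "]")):
--             if out[-1].isalnum() or out[-1] in (")", "]", "*", "`"):
--                 if part[0].isalnum() or part[0] in ("[", "*", "`", "("):
--                     out += " "
--         out += part
--     return out
-- ===== SOURCE B (Python) =====
-- def _sep(a: str, b: str) -> str:
--     x, y = a[-1], b[0]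
--     if x in " \n" or y in " \n.,:;!?)]":
--         return ""
--     if (x.isalnum() or x in ")]*`") and (y.isalnum() or y in "[*`("):
--         return " "
--     return ""
--
--
-- def _join_fragments(parts: list[str]) -> str:
--     n = len(parts)
--     if n == 0:
--         return ""
--     if n == 1:
--         return parts[0]
--     left = _join_fragments(parts[: n // 2])
--     right = _join_fragments(parts[n // 2:])
--     if not left:
--         return right
--     if not right:
--         return left
--     return left + _sep(left, right) + right
-- ===== Notes on version B (the rewrite author's own statement) =====
-- stated objective: alternative
-- what changed: B is a divide-and-conquer join: it recursively joins the left and right halves of the list and merges the two joined strings with one separator decision (last char of the left result vs first char of the right result), instead of A's left-to-right accumulator pass that re-reads the growing string with endswith/startswith for every fragment.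
import Mathlib
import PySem

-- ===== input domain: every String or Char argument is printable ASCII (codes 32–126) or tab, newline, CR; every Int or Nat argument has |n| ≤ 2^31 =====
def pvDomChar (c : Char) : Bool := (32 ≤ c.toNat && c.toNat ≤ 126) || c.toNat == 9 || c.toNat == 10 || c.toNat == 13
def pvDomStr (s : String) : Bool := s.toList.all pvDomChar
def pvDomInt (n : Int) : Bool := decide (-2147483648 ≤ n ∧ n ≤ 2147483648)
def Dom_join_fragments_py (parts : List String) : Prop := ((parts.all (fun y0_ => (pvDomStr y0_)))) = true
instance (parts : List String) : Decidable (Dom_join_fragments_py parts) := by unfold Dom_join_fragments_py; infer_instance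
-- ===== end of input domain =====

-- B joins the fragments by divide and conquer: join each half recursively, then merge the two
-- joined strings with one separator decision (objective: alternative algorithm, not faster).

-- ===== PORT A =====
-- literal transliteration of A's accumulator loop (endswith/startswith on the growing string)
def aStep (out : List Char) (part : List Char) : List Char :=
  if part.isEmpty then out
  else
    let out' :=
      if (!out.isEmpty)
         && !(PySem.Chars.endswith out [' '] || PySem.Chars.endswith out ['\n'])
         && !(PySem.Chars.startswith part [' '] || PySem.Chars.startswith part ['\n']
              || PySem.Chars.startswith part ['.'] || PySem.Chars.startswith part [',']
              || PySem.Chars.startswith part [':'] || PySem.Chars.startswith part [';']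
              || PySem.Chars.startswith part ['!'] || PySem.Chars.startswith part ['?']
              || PySem.Chars.startswith part [')'] || PySem.Chars.startswith part [']']) then
        if (match PySem.List.pyGet? out (-1) with
            | some c => PySem.Chars.isalnum c || (c == ')' || c == ']' || c == '*' || c == '`')
            | none => false) then
          if (match PySem.List.pyGet? part 0 with
              | some c => PySem.Chars.isalnum c || (c == '[' || c == '*' || c == '`' || c == '(')
              | none => false) then out ++ [' ']
          else out
        else out
      else out
    out' ++ part

def join_fragments_py (parts : List String) : String :=
  String.ofList (parts.foldl (fun out p => aStep out p.toList) [])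

-- ===== PORT B =====
-- transliteration of Source B's _sep (a[-1] / b[0] on the joined halves)
def sepB (a b : List Char) : List Char :=
  match a.getLast?, b.head? with
  | some x, some y =>
    if x == ' ' || x == '\n' || y == ' ' || y == '\n' || y == '.' || y == ',' || y == ':'
       || y == ';' || y == '!' || y == '?' || y == ')' || y == ']' then []
    else if (PySem.Chars.isalnum x || x == ')' || x == ']' || x == '*' || x == '`')
            && (PySem.Chars.isalnum y || y == '[' || y == '*' || y == '`' || y == '(') then [' ']
    else []
  | _, _ => []

-- transliteration of Source B's divide-and-conquer recursion
def bJoin : List (List Char) → List Char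
  | [] => []
  | [p] => p
  | p :: q :: rest =>
    let parts := p :: q :: rest
    let n := parts.length
    let left := bJoin (parts.take (n / 2))
    let right := bJoin (parts.drop (n / 2))
    if left.isEmpty then right
    else if right.isEmpty then left
    else left ++ sepB left right ++ right
termination_by parts => parts.length
decreasing_by
  · simp [List.length_take]; omega
  · simp [List.length_drop]; omega

def join_fragments_py_alt (parts : List String) : String :=
  String.ofList (bJoin (parts.map String.toList))

-- ===== PRECONDITION & SPEC =====
def Spec_join_fragments_py (parts : List String) (out : String) : Prop := out = join_fragments_py_alt parts
instance (parts : List String) (out : String) : Decidable (Spec_join_fragments_py parts out) := by unfold Spec_join_fragments_py; infer_instance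

-- ===== CLAIM (what is proved, stated in full; the proofs are below) =====
def Claim_equal_join_fragments_py : Prop := ∀ (parts : List String), Dom_join_fragments_py parts → Spec_join_fragments_py parts (join_fragments_py parts)

-- ===== LEMMAS AND PROOFS =====

-- proof-side normal form: first non-empty fragment, then separator+fragment pieces
def needsSpaceB (a b : Char) : Bool :=
  if a == ' ' || a == '\n' || b == ' ' || b == '\n' || b == '.' || b == ',' || b == ':'
     || b == ';' || b == '!' || b == '?' || b == ')' || b == ']' then false
  else (PySem.Chars.isalnum a || a == ')' || a == ']' || a == '*' || a == '`')
       && (PySem.Chars.isalnum b || b == '[' || b == '*' || b == '`' || b == '(')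

def needsSpaceOpt (prev cur : List Char) : Bool :=
  match prev.getLast?, cur.head? with
  | some a, some b => needsSpaceB a b
  | _, _ => false

def bGo (prev : List Char) : List (List Char) → List (List Char)
  | [] => []
  | cur :: rest => ((if needsSpaceOpt prev cur then [' '] else []) ++ cur) :: bGo cur rest

def jnf (L : List (List Char)) : List Char :=
  match L.filter (fun p => !p.isEmpty) with
  | [] => []
  | p0 :: rest => p0 ++ (bGo p0 rest).flatten

theorem endswith_singleton (s : List Char) (c : Char) :
    PySem.Chars.endswith s [c] = (s.getLast? == some c) := by
  rw [Bool.eq_iff_iff, PySem.Chars.endswith_iff, beq_iff_eq]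
  constructor
  · rintro ⟨t, rfl⟩; simp
  · intro h
    obtain ⟨l', rfl⟩ := List.getLast?_eq_some_iff.mp h
    exact ⟨l', rfl⟩

theorem startswith_singleton (s : List Char) (c : Char) :
    PySem.Chars.startswith s [c] = (s.head? == some c) := by
  rw [Bool.eq_iff_iff, PySem.Chars.startswith_iff, beq_iff_eq]
  constructor
  · rintro ⟨t, rfl⟩; simp
  · intro h
    obtain ⟨t, rfl⟩ := List.head?_eq_some_iff.mp h
    exact ⟨t, rfl⟩

theorem aStep_eq (out part : List Char) (ho : out ≠ []) (hp : part ≠ []) :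
    aStep out part = out ++ (if needsSpaceOpt out part then [' '] else []) ++ part := by
  obtain ⟨a, ha⟩ := Option.isSome_iff_exists.mp (List.getLast?_isSome.mpr ho)
  obtain ⟨b, t, rfl⟩ : ∃ b t, part = b :: t := by
    cases part with
    | nil => exact absurd rfl hp
    | cons b t => exact ⟨b, t, rfl⟩
  simp only [aStep, List.isEmpty_cons, endswith_singleton, startswith_singleton,
    PySem.List.pyGet?_neg_one, ha, needsSpaceOpt, List.head?_cons, needsSpaceB,
    PySem.List.pyGet?_zero_cons, Bool.not_or, Bool.and_assoc, Bool.or_assoc]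
  have hoe : out.isEmpty = false := by simp [ho]
  simp only [hoe, Bool.not_false, Bool.true_and, Bool.false_eq_true, if_false,
    show ∀ (x y : Char), (some x == some y) = (x == y) from fun x y => by
      cases h : x == y <;> simp_all]
  split_ifs <;> simp_all

theorem bGo_congr (prev prev' : List Char) (h : prev.getLast? = prev'.getLast?)
    (l : List (List Char)) : bGo prev l = bGo prev' l := by
  cases l with
  | nil => rfl
  | cons cur rest => simp [bGo, needsSpaceOpt, h]

theorem getLast?_sep (out part : List Char) (hp : part ≠ []) (sep : List Char) :
    (out ++ sep ++ part).getLast? = part.getLast? := by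
  rw [List.getLast?_append_of_ne_nil _ hp]

theorem foldA_eq (parts : List (List Char)) : ∀ out, out ≠ [] →
    parts.foldl aStep out
      = out ++ (bGo out (parts.filter (fun p => !p.isEmpty))).flatten := by
  induction parts with
  | nil => intro out _; simp [bGo]
  | cons p rest ih =>
    intro out ho
    by_cases hp : p = []
    · subst hp
      simpa [aStep] using ih out ho
    · have hstep := aStep_eq out p ho hp
      have hne : aStep out p ≠ [] := by
        rw [hstep]; simp [hp]
      have := ih (aStep out p) hne
      rw [List.foldl_cons, this, hstep,
        bGo_congr _ p (by rw [getLast?_sep _ _ hp]) (rest.filter (fun p => !p.isEmpty))]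
      simp [hp, bGo]

theorem foldA_from_nil (L : List (List Char)) :
    L.foldl aStep [] = jnf L := by
  unfold jnf
  induction L with
  | nil => rfl
  | cons p rest ih =>
    by_cases hp : p = []
    · subst hp; simpa [aStep] using ih
    · have h0 : aStep [] p = p := by simp [aStep]
      rw [List.foldl_cons, h0, foldA_eq rest p hp]
      simp [hp]

-- ===== B-side lemmas =====

theorem sepB_eq (a b : List Char) :
    sepB a b = (if needsSpaceOpt a b then [' '] else []) := by
  unfold sepB needsSpaceOpt needsSpaceB
  cases a.getLast? <;> cases b.head? <;> (simp; try (split_ifs <;> simp_all))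

theorem filter_all_ne (L : List (List Char)) (q : List Char)
    (hq : q ∈ L.filter (fun p => !p.isEmpty)) : q ≠ [] := by
  have := List.of_mem_filter hq
  simpa using this

theorem jnf_head? (L : List (List Char)) (p0 : List Char) (rest : List (List Char))
    (h : L.filter (fun p => !p.isEmpty) = p0 :: rest) :
    (jnf L).head? = p0.head? := by
  have hp0 : p0 ≠ [] := filter_all_ne L p0 (by rw [h]; simp)
  unfold jnf
  rw [h]
  cases p0 with
  | nil => exact absurd rfl hp0
  | cons c t => simp

theorem flat_last (rest : List (List Char)) : ∀ (p0 : List Char), p0 ≠ [] →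
    (∀ q ∈ rest, q ≠ []) →
    (p0 ++ (bGo p0 rest).flatten).getLast? = (rest.getLastD p0).getLast? := by
  induction rest with
  | nil => intro p0 _ _; simp [bGo]
  | cons cur rest' ih =>
    intro p0 hp0 hall
    have hcur : cur ≠ [] := hall cur (by simp)
    have htail := ih cur hcur (fun q hq => hall q (by simp [hq]))
    have hsplit : p0 ++ (bGo p0 (cur :: rest')).flatten
        = (p0 ++ (if needsSpaceOpt p0 cur then [' '] else [])) ++ (cur ++ (bGo cur rest').flatten) := by
      simp [bGo]
    rw [hsplit, List.getLast?_append_of_ne_nil _ (by simp [hcur]), htail]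
    cases rest' <;> simp [List.getLastD]

theorem jnf_getLast? (L : List (List Char)) (p0 : List Char) (rest : List (List Char))
    (h : L.filter (fun p => !p.isEmpty) = p0 :: rest) :
    (jnf L).getLast? = (rest.getLastD p0).getLast? := by
  have hall : ∀ q ∈ p0 :: rest, q ≠ [] := fun q hq => filter_all_ne L q (by rw [h]; exact hq)
  unfold jnf
  rw [h]
  exact flat_last rest p0 (hall p0 (by simp)) (fun q hq => hall q (by simp [hq]))

theorem bGo_append (xs ys : List (List Char)) : ∀ prev,
    bGo prev (xs ++ ys) = bGo prev xs ++ bGo (xs.getLastD prev) ys := by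
  induction xs with
  | nil => intro prev; simp [bGo]
  | cons cur xs' ih =>
    intro prev
    simp only [List.cons_append, bGo, ih cur, List.getLastD]
    cases xs' with
    | nil => simp
    | cons h t => simp

theorem jnf_ne_nil (L : List (List Char)) (p0 : List Char) (rest : List (List Char))
    (h : L.filter (fun p => !p.isEmpty) = p0 :: rest) : jnf L ≠ [] := by
  have hp0 : p0 ≠ [] := filter_all_ne L p0 (by rw [h]; simp)
  unfold jnf
  rw [h]
  simp [hp0]

theorem jnf_eq (L : List (List Char)) (p0 : List Char) (rest : List (List Char))
    (h : L.filter (fun p => !p.isEmpty) = p0 :: rest) :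
    jnf L = p0 ++ (bGo p0 rest).flatten := by
  unfold jnf
  rw [h]

theorem jnf_append (l r : List (List Char)) :
    jnf (l ++ r)
      = (if (jnf l).isEmpty then jnf r
         else if (jnf r).isEmpty then jnf l
         else jnf l ++ sepB (jnf l) (jnf r) ++ jnf r) := by
  cases hl : l.filter (fun p => !p.isEmpty) with
  | nil =>
    have he : (jnf l).isEmpty = true := by unfold jnf; rw [hl]; rfl
    rw [he, if_pos rfl]
    unfold jnf
    rw [List.filter_append, hl, List.nil_append]
  | cons p0 restl =>
    have hlne := jnf_ne_nil l p0 restl hl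
    rw [if_neg (by simpa using hlne)]
    cases hr : r.filter (fun p => !p.isEmpty) with
    | nil =>
      have he : (jnf r).isEmpty = true := by unfold jnf; rw [hr]; rfl
      rw [he, if_pos rfl]
      unfold jnf
      rw [List.filter_append, hl, hr, List.append_nil]
    | cons q0 restr =>
      have hrne := jnf_ne_nil r q0 restr hr
      rw [if_neg (by simpa using hrne)]
      have hsep : needsSpaceOpt (jnf l) (jnf r) = needsSpaceOpt (restl.getLastD p0) q0 := by
        unfold needsSpaceOpt
        rw [jnf_getLast? l p0 restl hl, jnf_head? r q0 restr hr]
      have hfl : (l ++ r).filter (fun p => !p.isEmpty) = p0 :: (restl ++ q0 :: restr) := by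
        rw [List.filter_append, hl, hr]; rfl
      rw [sepB_eq, hsep, jnf_eq (l ++ r) p0 (restl ++ q0 :: restr) hfl,
        bGo_append restl (q0 :: restr) p0,
        show bGo (restl.getLastD p0) (q0 :: restr)
          = ((if needsSpaceOpt (restl.getLastD p0) q0 then [' '] else []) ++ q0) :: bGo q0 restr from rfl,
        jnf_eq l p0 restl hl, jnf_eq r q0 restr hr]
      simp

theorem bJoin_eq_jnf (L : List (List Char)) : bJoin L = jnf L := by
  match L with
  | [] => rw [bJoin.eq_def]; rfl
  | [p] =>
    rw [bJoin.eq_def]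
    by_cases hp : p = []
    · subst hp; rfl
    · unfold jnf; simp [hp, bGo]
  | p :: q :: rest =>
    rw [bJoin.eq_def]
    simp only []
    rw [bJoin_eq_jnf ((p :: q :: rest).take ((p :: q :: rest).length / 2)),
        bJoin_eq_jnf ((p :: q :: rest).drop ((p :: q :: rest).length / 2)),
        ← jnf_append, List.take_append_drop]
termination_by L.length
decreasing_by
  · simp [List.length_take]; omega
  · simp [List.length_drop]; omega

-- ===== VERDICT (by name: the statement is the Claim_ definition above) =====
theorem join_fragments_py_spec : Claim_equal_join_fragments_py := by
  intro parts _
  unfold Spec_join_fragments_py join_fragments_py join_fragments_py_alt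
  rw [← List.foldl_map, foldA_from_nil, bJoin_eq_jnf]
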